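-- pv_equiv track=rewrite | github.com/paulklemstine/factor | lean/demo/Pythagorean/QuadDivision_InteractiveDemo.py | lift_to_quadruples
-- ===== SOURCE A (Python) =====
-- def lift_to_quadruples(a, b, c):
--     """Lift triple (a,b,c) to all quadruples (a,b,k,d)."""
--     quads = []
--     c2 = c * c
--     for div in range(1, c + 1):
--         if c2 % div == 0:
--             comp = c2 // div
--             if (div + comp) % 2 == 0 and div < comp:
--                 d = (div + comp) // 2
--                 k = (comp - div) // 2
--                 if k > 0:
--                     quads.append((a, b, k, d))
--     return quads
-- ===== SOURCE B (Python) =====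
-- def lift_to_quadruples(a, b, c):
--     """Lift triple (a,b,c) to all quadruples (a,b,k,d).
--
--     Instead of scanning all of 1..c for divisors of c*c, collect the
--     divisors of c in O(sqrt(c)) by trial division up to sqrt(c); every
--     divisor of c*c is a product of two divisors of c, so the divisor
--     pairs come from the (small) product set, sorted to recover A's
--     ascending order.  div < c forces comp = c*c//div > c > div, and the
--     common-parity test makes k = (comp-div)//2 >= 1 automatically.
--     """
--     small = []
--     i = 1
--     while i * i <= c:
--         if c % i == 0:
--             small.append(i)
--             small.append(c // i)
--         i += 1
--     c2 = c * c
--     quads = []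
--     for div in sorted({d1 * d2 for d1 in small for d2 in small}):
--         if div < c and (div + c2 // div) % 2 == 0:
--             comp = c2 // div
--             quads.append((a, b, (comp - div) // 2, (div + comp) // 2))
--     return quads
-- ===== Notes on version B (the rewrite author's own statement) =====
-- stated objective: faster
-- what changed: Replaces A's linear scan of every candidate divisor 1..c of c*c by collecting the divisors of c with trial division up to sqrt(c), forming all pairwise products (every divisor of c*c is a product of two divisors of c), deduplicating and sorting them, so only the actual divisors are visited.
import Mathlib
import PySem

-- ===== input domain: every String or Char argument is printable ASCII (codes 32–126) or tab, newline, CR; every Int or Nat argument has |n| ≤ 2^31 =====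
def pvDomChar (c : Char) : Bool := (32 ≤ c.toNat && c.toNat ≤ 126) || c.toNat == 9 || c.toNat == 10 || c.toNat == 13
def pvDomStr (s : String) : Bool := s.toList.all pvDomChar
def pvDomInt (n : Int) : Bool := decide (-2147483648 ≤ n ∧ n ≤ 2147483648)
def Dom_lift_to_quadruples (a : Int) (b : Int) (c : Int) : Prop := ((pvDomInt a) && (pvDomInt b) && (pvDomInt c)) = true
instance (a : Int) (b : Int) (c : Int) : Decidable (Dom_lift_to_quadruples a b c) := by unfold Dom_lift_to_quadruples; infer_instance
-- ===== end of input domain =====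

-- B replaces A's 1..c scan for divisors of c*c by trial division of c up to sqrt(c) and a
-- sorted product set of the divisors found there; objective: asymptotically faster.

-- ===== PORT A =====
def lift_to_quadruples (a : Int) (b : Int) (c : Int) : List (List Int) :=
  let c2 := c * c
  (PySem.List.pyRange 1 (c + 1) 1).foldl (fun quads div =>
    if PySem.Int.mod c2 div = 0 then
      let comp := PySem.Int.floordiv c2 div
      if PySem.Int.mod (div + comp) 2 = 0 ∧ div < comp then
        let d := PySem.Int.floordiv (div + comp) 2
        let k := PySem.Int.floordiv (comp - div) 2
        if k > 0 then quads ++ [[a, b, k, d]] else quads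
      else quads
    else quads) []

-- ===== PORT B =====
-- while i * i <= c: collect i and c // i when they divide c
def pvSmallDivs (c : Int) (i : Int) : List Int :=
  if _h : i * i ≤ c then
    (if PySem.Int.mod c i = 0 then [i, PySem.Int.floordiv c i] else []) ++ pvSmallDivs c (i + 1)
  else []
termination_by (c + 1 - i).toNat
decreasing_by
  have hi : i ≤ i * i := by
    by_cases h0 : i ≤ 0
    · exact le_trans h0 (mul_self_nonneg i)
    · nlinarith
  omega

-- sorted({d1 * d2 for d1 in small for d2 in small})
def pvDivs (c : Int) : List Int :=
  PySem.List.sorted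
    (PySem.Set.ofList ((pvSmallDivs c 1).flatMap (fun d1 => (pvSmallDivs c 1).map (fun d2 => d1 * d2))))
    (fun x => x) false

def lift_to_quadruples_alt (a : Int) (b : Int) (c : Int) : List (List Int) :=
  let c2 := c * c
  (pvDivs c).foldl (fun quads div =>
    if div < c ∧ PySem.Int.mod (div + PySem.Int.floordiv c2 div) 2 = 0 then
      let comp := PySem.Int.floordiv c2 div
      quads ++ [[a, b, PySem.Int.floordiv (comp - div) 2, PySem.Int.floordiv (div + comp) 2]]
    else quads) []

-- ===== PRECONDITION & SPEC =====
def Spec_lift_to_quadruples (a : Int) (b : Int) (c : Int) (out : List (List Int)) : Prop := out = lift_to_quadruples_alt a b c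
instance (a : Int) (b : Int) (c : Int) (out : List (List Int)) : Decidable (Spec_lift_to_quadruples a b c out) := by unfold Spec_lift_to_quadruples; infer_instance

-- ===== CLAIM (what is proved, stated in full; the proofs are below) =====
def Claim_equal_lift_to_quadruples : Prop := ∀ (a : Int) (b : Int) (c : Int), Dom_lift_to_quadruples a b c → Spec_lift_to_quadruples a b c (lift_to_quadruples a b c)

-- ===== LEMMAS AND PROOFS =====

-- A's pass condition and the common quadruple builder
def pvPA (c d : Int) : Bool :=
  decide (PySem.Int.mod (c * c) d = 0 ∧
    (PySem.Int.mod (d + PySem.Int.floordiv (c * c) d) 2 = 0 ∧ d < PySem.Int.floordiv (c * c) d) ∧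
    0 < PySem.Int.floordiv (PySem.Int.floordiv (c * c) d - d) 2)

def pvPB (c d : Int) : Bool :=
  decide (d < c ∧ PySem.Int.mod (d + PySem.Int.floordiv (c * c) d) 2 = 0)

def pvF (a b c d : Int) : List Int :=
  [a, b, PySem.Int.floordiv (PySem.Int.floordiv (c * c) d - d) 2,
         PySem.Int.floordiv (d + PySem.Int.floordiv (c * c) d) 2]

lemma A_eq (a b c : Int) :
    lift_to_quadruples a b c
      = ((PySem.List.pyRange 1 (c + 1) 1).filter (pvPA c)).map (pvF a b c) := by
  have hfun : (fun (quads : List (List Int)) (div : Int) =>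
      if PySem.Int.mod (c * c) div = 0 then
        let comp := PySem.Int.floordiv (c * c) div
        if PySem.Int.mod (div + comp) 2 = 0 ∧ div < comp then
          let d := PySem.Int.floordiv (div + comp) 2
          let k := PySem.Int.floordiv (comp - div) 2
          if k > 0 then quads ++ [[a, b, k, d]] else quads
        else quads
      else quads)
      = fun quads div => if pvPA c div = true then quads ++ [pvF a b c div] else quads := by
    funext quads div
    simp only [pvPA, pvF, decide_eq_true_eq]
    split_ifs <;> tauto
  show (PySem.List.pyRange 1 (c + 1) 1).foldl _ [] = _
  rw [hfun, PySem.List.foldl_append_ite]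
  simp

lemma B_eq (a b c : Int) :
    lift_to_quadruples_alt a b c = ((pvDivs c).filter (pvPB c)).map (pvF a b c) := by
  have hfun : (fun (quads : List (List Int)) (div : Int) =>
      if div < c ∧ PySem.Int.mod (div + PySem.Int.floordiv (c * c) div) 2 = 0 then
        let comp := PySem.Int.floordiv (c * c) div
        quads ++ [[a, b, PySem.Int.floordiv (comp - div) 2, PySem.Int.floordiv (div + comp) 2]]
      else quads)
      = fun quads div => if pvPB c div = true then quads ++ [pvF a b c div] else quads := by
    funext quads div
    simp only [pvPB, pvF, decide_eq_true_eq]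
  show (pvDivs c).foldl _ [] = _
  rw [hfun, PySem.List.foldl_append_ite]
  simp

-- exact quotient: from mod = 0 the floordiv is the exact cofactor
lemma exact_mul {c2 div : Int} (hm : PySem.Int.mod c2 div = 0) :
    PySem.Int.floordiv c2 div * div = c2 := by
  have := PySem.Int.floordiv_mul_add_mod c2 div
  omega

-- the cofactor of a divisor below c exceeds c
lemma comp_gt {c div comp : Int} (h1 : 0 < div) (h2 : div < c) (hmul : comp * div = c * c) :
    c < comp := by
  nlinarith [hmul, h1, h2, sq_nonneg c]

-- soundness of the trial-division collector: it yields positive divisors of c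
lemma small_sound (c : Int) (hc : 1 ≤ c) :
    ∀ (n : Nat) (i : Int), (c + 1 - i).toNat ≤ n → 1 ≤ i →
      ∀ x ∈ pvSmallDivs c i, 1 ≤ x ∧ x ∣ c := by
  intro n
  induction n with
  | zero =>
    intro i hb hi x hx
    have hic : c + 1 ≤ i := by omega
    rw [pvSmallDivs, dif_neg (show ¬ i * i ≤ c by nlinarith)] at hx
    simp at hx
  | succ n ih =>
    intro i hb hi x hx
    rw [pvSmallDivs] at hx
    by_cases hii : i * i ≤ c
    · rw [dif_pos hii] at hx
      have hic : i ≤ c := by nlinarith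
      rcases List.mem_append.1 hx with h | h
      · by_cases hm : PySem.Int.mod c i = 0
        · rw [if_pos hm] at h
          have hdvd : i ∣ c := (PySem.Int.mod_eq_zero_iff_dvd c i).1 hm
          have hmul := exact_mul hm
          rcases List.mem_cons.1 h with rfl | h2
          · exact ⟨hi, hdvd⟩
          · have hx2 : x = PySem.Int.floordiv c i := by simpa using h2
            subst hx2
            refine ⟨by nlinarith, ⟨i, hmul.symm⟩⟩
        · rw [if_neg hm] at h; simp at h
      · exact ih (i + 1) (by omega) (by omega) x h
    · rw [dif_neg hii] at hx; simp at hx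

-- completeness stepper: a divisor j with j*j ≤ c (and its cofactor) is reached from any i ≤ j
lemma small_reach (c : Int) :
    ∀ (n : Nat) (i j : Int), (j - i).toNat ≤ n → 1 ≤ i → i ≤ j → j * j ≤ c →
      PySem.Int.mod c j = 0 →
      j ∈ pvSmallDivs c i ∧ PySem.Int.floordiv c j ∈ pvSmallDivs c i := by
  intro n
  induction n with
  | zero =>
    intro i j hb hi hij hjj hm
    have : i = j := by omega
    subst this
    rw [pvSmallDivs, dif_pos hjj, if_pos hm]
    simp
  | succ n ih =>
    intro i j hb hi hij hjj hm
    rcases eq_or_lt_of_le hij with rfl | hlt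
    · rw [pvSmallDivs, dif_pos hjj, if_pos hm]
      simp
    · have hii : i * i ≤ c := by nlinarith
      have hrec := ih (i + 1) j (by omega) (by omega) (by omega) hjj hm
      rw [pvSmallDivs, dif_pos hii]
      exact ⟨List.mem_append_right _ hrec.1, List.mem_append_right _ hrec.2⟩

-- completeness: every positive divisor of c is collected
lemma small_complete (c x : Int) (hc : 1 ≤ c) (hx : 1 ≤ x) (hd : x ∣ c) :
    x ∈ pvSmallDivs c 1 := by
  obtain ⟨y, hy⟩ := hd
  have hy1 : 1 ≤ y := by nlinarith
  by_cases hxx : x * x ≤ c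
  · exact (small_reach c (x - 1).toNat 1 x (by omega) le_rfl hx hxx
      ((PySem.Int.mod_eq_zero_iff_dvd c x).2 ⟨y, hy⟩)).1
  · have hyy : y * y ≤ c := by nlinarith
    have hm : PySem.Int.mod c y = 0 :=
      (PySem.Int.mod_eq_zero_iff_dvd c y).2 ⟨x, by rw [hy]; ring⟩
    have hmem := (small_reach c (y - 1).toNat 1 y (by omega) le_rfl hy1 hyy hm).2
    have hfd : PySem.Int.floordiv c y = x := by
      have hmul := exact_mul hm
      have hy0 : y ≠ 0 := by omega
      exact mul_right_cancel₀ hy0 (by rw [hmul, hy])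
    rwa [hfd] at hmem

lemma small_mem (c x : Int) (hc : 1 ≤ c) :
    x ∈ pvSmallDivs c 1 ↔ 1 ≤ x ∧ x ∣ c :=
  ⟨fun h => small_sound c hc (c.toNat) 1 (by omega) le_rfl x h,
   fun ⟨h1, h2⟩ => small_complete c x hc h1 h2⟩

-- every divisor of c² splits as a product of two divisors of c (via gcd, in ℕ)
lemma nat_split (x c : Nat) (hc : 0 < c) (h : x ∣ c * c) :
    ∃ d1 d2 : Nat, d1 ∣ c ∧ d2 ∣ c ∧ x = d1 * d2 := by
  have hg : 0 < Nat.gcd x c := Nat.gcd_pos_of_pos_right x hc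
  refine ⟨Nat.gcd x c, x / Nat.gcd x c, Nat.gcd_dvd_right x c, ?_, (Nat.mul_div_cancel' (Nat.gcd_dvd_left x c)).symm⟩
  have hco : Nat.Coprime (x / Nat.gcd x c) (c / Nat.gcd x c) :=
    Nat.coprime_div_gcd_div_gcd hg
  have hxc : Nat.gcd x c * (x / Nat.gcd x c) ∣ Nat.gcd x c * ((c / Nat.gcd x c) * c) := by
    rw [Nat.mul_div_cancel' (Nat.gcd_dvd_left x c), ← mul_assoc,
      Nat.mul_div_cancel' (Nat.gcd_dvd_right x c)]
    exact h
  have hdvd : x / Nat.gcd x c ∣ (c / Nat.gcd x c) * c :=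
    (mul_dvd_mul_iff_left (by omega : Nat.gcd x c ≠ 0)).1 hxc
  exact Nat.Coprime.dvd_of_dvd_mul_left hco hdvd

lemma int_split (x c : Int) (hx : 1 ≤ x) (hc : 1 ≤ c) (h : x ∣ c * c) :
    ∃ d1 d2 : Int, 1 ≤ d1 ∧ 1 ≤ d2 ∧ d1 ∣ c ∧ d2 ∣ c ∧ x = d1 * d2 := by
  lift x to ℕ using (by omega : (0:Int) ≤ x)
  lift c to ℕ using (by omega : (0:Int) ≤ c)
  have h' : x ∣ c * c := by exact_mod_cast h
  have hc' : 0 < c := by exact_mod_cast hc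
  obtain ⟨d1, d2, hd1, hd2, hx12⟩ := nat_split x c hc' h'
  refine ⟨(d1 : Int), (d2 : Int), ?_, ?_, ?_, ?_, ?_⟩
  · exact_mod_cast Nat.pos_of_dvd_of_pos hd1 hc'
  · exact_mod_cast Nat.pos_of_dvd_of_pos hd2 hc'
  · exact_mod_cast hd1
  · exact_mod_cast hd2
  · exact_mod_cast congrArg (Nat.cast : Nat → Int) hx12

-- membership in the product list is exactly "positive divisor of c²"
lemma divs_mem (c x : Int) (hc : 1 ≤ c) :
    x ∈ pvDivs c ↔ 1 ≤ x ∧ x ∣ c * c := by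
  unfold pvDivs
  rw [PySem.List.mem_sorted, PySem.Set.mem_ofList]
  simp only [List.mem_flatMap, List.mem_map]
  constructor
  · rintro ⟨d1, hd1, d2, hd2, rfl⟩
    obtain ⟨h1, hdv1⟩ := (small_mem c d1 hc).1 hd1
    obtain ⟨h2, hdv2⟩ := (small_mem c d2 hc).1 hd2
    exact ⟨by nlinarith, mul_dvd_mul hdv1 hdv2⟩
  · rintro ⟨h1, hdvd⟩
    obtain ⟨d1, d2, hp1, hp2, hdv1, hdv2, rfl⟩ := int_split x c h1 hc hdvd
    exact ⟨d1, (small_mem c d1 hc).2 ⟨hp1, hdv1⟩, d2, (small_mem c d2 hc).2 ⟨hp2, hdv2⟩, rfl⟩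

-- the two pass conditions select the same integers (c ≥ 1)
lemma key_iff (c x : Int) (hc : 1 ≤ c) :
    ((1 ≤ x ∧ x < c + 1) ∧ pvPA c x = true) ↔ ((1 ≤ x ∧ x ∣ c * c) ∧ pvPB c x = true) := by
  simp only [pvPA, pvPB, decide_eq_true_eq]
  constructor
  · rintro ⟨⟨h1, h2⟩, hm, ⟨hpar, hlt⟩, _⟩
    have hmul := exact_mul hm
    have hxc : x < c := by
      rcases lt_or_eq_of_le (by omega : x ≤ c) with h | rfl
      · exact h
      · exact absurd hlt (by
          have : PySem.Int.floordiv (x * x) x = x :=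
            mul_right_cancel₀ (by omega : x ≠ 0) hmul
          omega)
    exact ⟨⟨h1, (PySem.Int.mod_eq_zero_iff_dvd _ _).1 hm⟩, hxc, hpar⟩
  · rintro ⟨⟨h1, hdvd⟩, hxc, hpar⟩
    have hm : PySem.Int.mod (c * c) x = 0 := (PySem.Int.mod_eq_zero_iff_dvd _ _).2 hdvd
    have hmul := exact_mul hm
    have hgt : c < PySem.Int.floordiv (c * c) x := comp_gt (by omega) hxc hmul
    have hpar2 : (2:Int) ∣ (x + PySem.Int.floordiv (c * c) x) :=
      (PySem.Int.mod_eq_zero_iff_dvd _ _).1 hpar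
    have hk : 0 < PySem.Int.floordiv (PySem.Int.floordiv (c * c) x - x) 2 := by
      have hmk : PySem.Int.mod (PySem.Int.floordiv (c * c) x - x) 2 = 0 := by
        rw [PySem.Int.mod_eq_zero_iff_dvd]; omega
      have := PySem.Int.floordiv_mul_add_mod (PySem.Int.floordiv (c * c) x - x) 2
      omega
    exact ⟨⟨h1, by omega⟩, hm, ⟨hpar, by omega⟩, hk⟩

-- the two filtered lists coincide: same members, both strictly increasing
lemma filters_eq (c : Int) :
    (PySem.List.pyRange 1 (c + 1) 1).filter (pvPA c) = (pvDivs c).filter (pvPB c) := by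
  by_cases hc : 1 ≤ c
  · haveI : Std.Irrefl (fun (a b : Int) => a < b) := ⟨lt_irrefl⟩
    have hs1 : ((PySem.List.pyRange 1 (c + 1) 1).filter (pvPA c)).Pairwise (· < ·) :=
      (PySem.List.pairwise_lt_pyRange_one 1 (c + 1)).sublist List.filter_sublist
    have hs2 : ((pvDivs c).filter (pvPB c)).Pairwise (· < ·) :=
      (PySem.List.sorted_ofList_pairwise_lt _).sublist List.filter_sublist
    refine hs1.eq_of_mem_iff hs2 (fun x => ?_)
    rw [List.mem_filter, List.mem_filter, PySem.List.mem_pyRange_one, divs_mem c x hc]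
    exact key_iff c x hc
  · rw [PySem.List.pyRange_one_eq_nil (by omega)]
    have hsmall : pvSmallDivs c 1 = [] := by
      rw [pvSmallDivs, dif_neg (by nlinarith : ¬ (1:Int) * 1 ≤ c)]
    have : pvDivs c = [] := by
      unfold pvDivs
      rw [hsmall]
      simp [PySem.List.sorted_eq_nil_iff]
    rw [this]
    rfl

-- ===== VERDICT (by name: the statement is the Claim_ definition above) =====
theorem lift_to_quadruples_spec : Claim_equal_lift_to_quadruples := by
  intro a b c _
  show lift_to_quadruples a b c = lift_to_quadruples_alt a b c
  rw [A_eq, B_eq, filters_eq]
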